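-- pv_equiv track=rewrite | github.com/xinyi0227/Leetcode_solutions | problem/Largest_Area_Square/largestSquareArea.py | largestSquareArea
-- ===== SOURCE A (Python) =====
-- def largestSquareArea(bottomLeft, topRight):
--     rects = []
--     n = len(bottomLeft)
--     for i in range(n):
--         rects.append((bottomLeft[i][0], bottomLeft[i][1], topRight[i][0], topRight[i][1]))
--
--     rects.sort()
--
--     max_side = 0
--
--     for r in range(1, n):
--         a, b, c, d = rects[r]
--         for l in range(r):
--             _, bj, cj, dj = rects[l]
--
--             width = min(cj, c) - a
--             height = min(dj, d) - max(bj, b)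
--             s = min(width, height)
--
--             if s > max_side:
--                 max_side = s
--
--     return max_side * max_side
-- ===== SOURCE B (Python) =====
-- def largestSquareArea(bottomLeft, topRight):
--     rects = [(bl[0], bl[1], tr[0], tr[1]) for bl, tr in zip(bottomLeft, topRight)]
--
--     def side(p, q):
--         return min(min(p[2], q[2]) - max(p[0], q[0]),
--                    min(p[3], q[3]) - max(p[1], q[1]))
--
--     def solve(rs):
--         if len(rs) < 2:
--             return 0
--         m = len(rs) // 2
--         left, right = rs[:m], rs[m:]
--         best = max(solve(left), solve(right))
--         for p in left:
--             for q in right: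
--                 s = side(p, q)
--                 if s > best:
--                     best = s
--         return best
--
--     b = solve(rects)
--     return b * b
-- ===== Notes on version B (the rewrite author's own statement) =====
-- stated objective: alternative
-- what changed: Replaces the sort-then-nested-index-scan with a recursive divide-and-conquer: split the rectangle list in half, solve each half recursively, and combine with a symmetric cross product of the two halves; no sort and no sorted-order left-edge trick.
import Mathlib
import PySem

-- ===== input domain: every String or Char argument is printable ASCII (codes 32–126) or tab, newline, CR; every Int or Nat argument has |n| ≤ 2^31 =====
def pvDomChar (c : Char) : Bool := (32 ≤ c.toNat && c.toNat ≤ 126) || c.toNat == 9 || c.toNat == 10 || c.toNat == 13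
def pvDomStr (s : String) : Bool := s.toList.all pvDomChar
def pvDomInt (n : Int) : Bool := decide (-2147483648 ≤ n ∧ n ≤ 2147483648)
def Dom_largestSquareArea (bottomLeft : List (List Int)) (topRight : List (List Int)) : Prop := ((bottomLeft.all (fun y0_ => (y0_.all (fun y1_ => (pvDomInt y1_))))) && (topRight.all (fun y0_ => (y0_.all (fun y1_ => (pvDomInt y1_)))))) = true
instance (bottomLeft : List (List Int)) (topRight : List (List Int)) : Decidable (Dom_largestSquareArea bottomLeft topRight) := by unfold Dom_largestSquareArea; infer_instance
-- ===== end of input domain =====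

-- B replaces A's sort + sorted-order nested index scan by a recursive divide-and-conquer
-- (solve halves, combine with a symmetric cross product); objective: alternative, same
-- O(n^2) cost; the claim is about the return value only — no argument is mutated.

-- ===== PORT A =====
-- Python's tuple sort order is lexicographic: encoded exactly by this nested Lex key.
def pvKey_largestSquareArea (t : Int × Int × Int × Int) : Lex (Int × Lex (Int × Lex (Int × Int))) :=
  toLex (t.1, toLex (t.2.1, toLex (t.2.2.1, t.2.2.2)))

def largestSquareArea (bottomLeft : List (List Int)) (topRight : List (List Int)) : Int :=
  let n : Int := bottomLeft.length
  -- for i in range(n): rects.append((bottomLeft[i][0], bottomLeft[i][1], topRight[i][0], topRight[i][1]))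
  -- (pyGetD defaults are never reached under Pre_largestSquareArea)
  let rects : List (Int × Int × Int × Int) :=
    (PySem.List.pyRange 0 n).foldl (fun acc i =>
      acc ++ [(PySem.List.pyGetD (PySem.List.pyGetD bottomLeft i []) 0 0,
               PySem.List.pyGetD (PySem.List.pyGetD bottomLeft i []) 1 0,
               PySem.List.pyGetD (PySem.List.pyGetD topRight i []) 0 0,
               PySem.List.pyGetD (PySem.List.pyGetD topRight i []) 1 0)]) []
  let rects := PySem.List.sorted rects pvKey_largestSquareArea
  let max_side : Int :=
    (PySem.List.pyRange 1 n).foldl (fun ms r =>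
      let t := PySem.List.pyGetD rects r (0, 0, 0, 0)
      let a := t.1
      let b := t.2.1
      let c := t.2.2.1
      let d := t.2.2.2
      (PySem.List.pyRange 0 r).foldl (fun ms l =>
        let u := PySem.List.pyGetD rects l (0, 0, 0, 0)
        let bj := u.2.1
        let cj := u.2.2.1
        let dj := u.2.2.2
        let width := min cj c - a
        let height := min dj d - max bj b
        let s := min width height
        if s > ms then s else ms) ms) 0
  max_side * max_side

-- ===== PORT B =====
-- helper 'side' of Source B
def pvSide (p q : Int × Int × Int × Int) : Int :=
  min (min p.2.2.1 q.2.2.1 - max p.1 q.1) (min p.2.2.2 q.2.2.2 - max p.2.1 q.2.1)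

-- helper 'solve' of Source B: divide and conquer over the rectangle list
-- (fuel = list length bounds the recursion depth; it is never exhausted, a totality device only)
def pvSolveF (fuel : Nat) (rs : List (Int × Int × Int × Int)) : Int :=
  match fuel with
  | 0 => 0
  | fuel + 1 =>
    if rs.length < 2 then 0
    else
      let m := rs.length / 2
      let left := rs.take m
      let right := rs.drop m
      let best := max (pvSolveF fuel left) (pvSolveF fuel right)
      left.foldl (fun best p =>
        right.foldl (fun best q =>
          let s := pvSide p q
          if s > best then s else best) best) best

def pvSolve (rs : List (Int × Int × Int × Int)) : Int :=
  pvSolveF rs.length rs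

def largestSquareArea_alt (bottomLeft : List (List Int)) (topRight : List (List Int)) : Int :=
  let rects : List (Int × Int × Int × Int) :=
    (bottomLeft.zip topRight).map (fun bt =>
      (PySem.List.pyGetD bt.1 0 0, PySem.List.pyGetD bt.1 1 0,
       PySem.List.pyGetD bt.2 0 0, PySem.List.pyGetD bt.2 1 0))
  let b := pvSolve rects
  b * b

-- ===== PRECONDITION & SPEC =====
-- Pre_ excludes exactly the inputs where the Python A raises IndexError: topRight shorter
-- than bottomLeft, or a used inner list with fewer than two coordinates.
def Pre_largestSquareArea (bottomLeft : List (List Int)) (topRight : List (List Int)) : Prop :=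
  bottomLeft.length ≤ topRight.length ∧
  (∀ l ∈ bottomLeft, 2 ≤ l.length) ∧
  (∀ l ∈ topRight.take bottomLeft.length, 2 ≤ l.length)
instance (bottomLeft : List (List Int)) (topRight : List (List Int)) : Decidable (Pre_largestSquareArea bottomLeft topRight) := by unfold Pre_largestSquareArea; infer_instance

def pvWitness_largestSquareArea : List (List Int) × List (List Int) :=
  ([[0, 0], [1, 1]], [[3, 3], [4, 4]])

def Spec_largestSquareArea (bottomLeft : List (List Int)) (topRight : List (List Int)) (out : Int) : Prop := out = largestSquareArea_alt bottomLeft topRight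
instance (bottomLeft : List (List Int)) (topRight : List (List Int)) (out : Int) : Decidable (Spec_largestSquareArea bottomLeft topRight out) := by unfold Spec_largestSquareArea; infer_instance

-- ===== CLAIM (what is proved, stated in full; the proofs are below) =====
def Claim_equal_largestSquareArea : Prop := ∀ (bottomLeft : List (List Int)) (topRight : List (List Int)), Dom_largestSquareArea bottomLeft topRight → Pre_largestSquareArea bottomLeft topRight → Spec_largestSquareArea bottomLeft topRight (largestSquareArea bottomLeft topRight)

-- ===== LEMMAS AND PROOFS =====

-- A's sorted-order pair score (x is the earlier element of the sorted list).
def pvGA (x y : Int × Int × Int × Int) : Int :=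
  min (min x.2.2.1 y.2.2.1 - y.1) (min x.2.2.2 y.2.2.2 - max x.2.1 y.2.1)

-- all pair scores, head-major
def pvPairs (g : (Int × Int × Int × Int) → (Int × Int × Int × Int) → Int) :
    List (Int × Int × Int × Int) → List Int
  | [] => []
  | x :: xs => xs.map (g x) ++ pvPairs g xs

theorem pv_ite_gt_eq_max (m v : Int) : (if m < v then v else m) = max m v := by
  rw [max_def]; split_ifs <;> omega

theorem pv_foldl_max_perm {l l' : List Int} (h : l.Perm l') (i : Int) :
    l.foldl max i = l'.foldl max i := by
  induction h generalizing i with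
  | nil => rfl
  | cons x _ ih => simpa using ih (max i x)
  | swap x y l => simp only [List.foldl_cons]; rw [max_right_comm]
  | trans _ _ ih1 ih2 => rw [ih1, ih2]

theorem pvPairs_append (g : (Int × Int × Int × Int) → (Int × Int × Int × Int) → Int)
    (l : List (Int × Int × Int × Int)) (y : Int × Int × Int × Int) :
    (pvPairs g (l ++ [y])).Perm (pvPairs g l ++ l.map (fun x => g x y)) := by
  induction l with
  | nil => simp [pvPairs]
  | cons x xs ih =>
    have h1 : pvPairs g ((x :: xs) ++ [y]) = xs.map (g x) ++ ([g x y] ++ pvPairs g (xs ++ [y])) := by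
      simp [pvPairs, List.append_assoc]
    have h2 : pvPairs g (x :: xs) ++ (x :: xs).map (fun x => g x y)
        = xs.map (g x) ++ (pvPairs g xs ++ (g x y :: xs.map (fun x => g x y))) := by
      simp [pvPairs, List.append_assoc]
    rw [h1, h2]
    refine List.Perm.append_left _ ?_
    refine (List.Perm.append_left [g x y] ih).trans ?_
    rw [List.singleton_append]
    exact List.perm_middle.symm

theorem pvPairs_perm {g : (Int × Int × Int × Int) → (Int × Int × Int × Int) → Int}
    (hg : ∀ x y, g x y = g y x)
    {l l' : List (Int × Int × Int × Int)} (h : l.Perm l') :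
    (pvPairs g l).Perm (pvPairs g l') := by
  induction h with
  | nil => exact List.Perm.refl _
  | cons x h ih => exact ((h.map (g x)).append ih)
  | swap x y l =>
    show ((x :: l).map (g y) ++ pvPairs g (x :: l)).Perm ((y :: l).map (g x) ++ pvPairs g (y :: l))
    simp only [List.map_cons, pvPairs, List.cons_append]
    rw [hg y x]
    refine List.Perm.cons _ ?_
    rw [← List.append_assoc, ← List.append_assoc]
    exact (List.perm_append_comm).append_right _
  | trans _ _ ih1 ih2 => exact ih1.trans ih2

theorem pvPairs_congr {g1 g2 : (Int × Int × Int × Int) → (Int × Int × Int × Int) → Int}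
    {rel : (Int × Int × Int × Int) → (Int × Int × Int × Int) → Prop}
    (hg : ∀ x y, rel x y → g1 x y = g2 x y) :
    ∀ {l : List (Int × Int × Int × Int)}, l.Pairwise rel → pvPairs g1 l = pvPairs g2 l := by
  intro l hl
  induction hl with
  | nil => rfl
  | cons hx _ ih =>
    show _ ++ _ = _ ++ _
    rw [ih, List.map_congr_left (fun y hy => hg _ y (hx y hy))]

-- a Python 'for l in range(k)' loop reading rs[l] is a fold over the prefix rs.take k
theorem pv_fold_range_take {α β : Type} (rs : List α) (d : α) (f : β → α → β) :
    ∀ (k : Nat), k ≤ rs.length → ∀ (i : β),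
      (PySem.List.pyRange 0 (k : Int)).foldl (fun acc j => f acc (PySem.List.pyGetD rs j d)) i
        = (rs.take k).foldl f i := by
  intro k
  induction k with
  | zero =>
    intro _ i
    rw [Nat.cast_zero, PySem.List.pyRange_one_eq_nil le_rfl]
    rfl
  | succ k ih =>
    intro hk i
    have hk' : k < rs.length := by omega
    have hcast : ((k + 1 : Nat) : Int) = (k : Int) + 1 := by push_cast; ring
    rw [hcast, PySem.List.pyRange_one_succ_right (by positivity), List.foldl_append,
      ih (by omega) i, List.take_succ, List.getElem?_eq_getElem hk']
    simp only [Option.toList_some, List.foldl_append, List.foldl_cons, List.foldl_nil,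
      PySem.List.pyGetD_natCast, List.getD_eq_getElem?_getD, List.getElem?_eq_getElem hk',
      Option.getD_some]

-- A's double loop over the first k rows equals the fold of max over the pair scores of rs.take k
theorem pv_outer_loop (rs : List (Int × Int × Int × Int)) :
    ∀ (k : Nat), k ≤ rs.length →
      (PySem.List.pyRange 1 (k : Int)).foldl (fun ms r =>
        (PySem.List.pyRange 0 r).foldl (fun ms l =>
          max ms (pvGA (PySem.List.pyGetD rs l (0, 0, 0, 0))
                        (PySem.List.pyGetD rs r (0, 0, 0, 0)))) ms) 0
        = List.foldl max 0 (pvPairs pvGA (rs.take k)) := by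
  intro k
  induction k with
  | zero =>
    intro _
    rw [Nat.cast_zero, PySem.List.pyRange_one_eq_nil (by omega)]
    rfl
  | succ k ih =>
    intro hk
    have hk' : k < rs.length := by omega
    rcases Nat.eq_zero_or_pos k with h0 | hpos
    · subst h0
      rw [Nat.cast_one, PySem.List.pyRange_one_eq_nil le_rfl]
      have h1 : rs.take 1 = [rs[0]] := by
        cases rs with
        | nil => simp at hk'
        | cons a t => simp
      rw [h1]
      rfl
    · have hcast : ((k + 1 : Nat) : Int) = (k : Int) + 1 := by push_cast; ring
      rw [hcast, PySem.List.pyRange_one_succ_right (by exact_mod_cast hpos), List.foldl_append,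
        ih (by omega)]
      simp only [List.foldl_cons, List.foldl_nil]
      rw [pv_fold_range_take rs (0,0,0,0)
        (fun ms x => max ms (pvGA x (PySem.List.pyGetD rs (k : Int) (0,0,0,0)))) k (by omega)]
      have hget : PySem.List.pyGetD rs (k : Int) (0,0,0,0) = rs[k] := by
        rw [PySem.List.pyGetD_natCast, List.getD_eq_getElem?_getD, List.getElem?_eq_getElem hk',
          Option.getD_some]
      rw [hget, ← List.foldl_map (f := fun x => pvGA x rs[k]) (g := max), ← List.foldl_append]
      have htake : rs.take (k + 1) = rs.take k ++ [rs[k]] := by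
        rw [List.take_succ, List.getElem?_eq_getElem hk']
        rfl
      rw [htake]
      exact (pv_foldl_max_perm (pvPairs_append pvGA (rs.take k) rs[k]) 0).symm

-- the two builds of the rectangle list coincide when topRight is long enough
theorem pv_rects_eq (bl tr : List (List Int)) (h : bl.length ≤ tr.length) :
    (PySem.List.pyRange 0 (bl.length : Int)).foldl (fun acc i =>
      acc ++ [(PySem.List.pyGetD (PySem.List.pyGetD bl i []) 0 0,
               PySem.List.pyGetD (PySem.List.pyGetD bl i []) 1 0,
               PySem.List.pyGetD (PySem.List.pyGetD tr i []) 0 0,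
               PySem.List.pyGetD (PySem.List.pyGetD tr i []) 1 0)]) []
    = (bl.zip tr).map (fun bt =>
      (PySem.List.pyGetD bt.1 0 0, PySem.List.pyGetD bt.1 1 0,
       PySem.List.pyGetD bt.2 0 0, PySem.List.pyGetD bt.2 1 0)) := by
  rw [PySem.List.foldl_append_singleton_eq_map, List.nil_append]
  apply List.ext_getElem
  · simp [PySem.List.length_pyRange_one]
    omega
  · intro k hk1 hk2
    have hkb : k < bl.length := by
      simpa [PySem.List.length_pyRange_one] using hk1
    have hkt : k < tr.length := by omega
    simp only [List.getElem_map]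
    have hr : ∀ (hx : k < (PySem.List.pyRange 0 (bl.length : Int)).length),
        (PySem.List.pyRange 0 (bl.length : Int))[k] = (k : Int) := by
      intro hx
      rw [PySem.List.getElem_pyRange_one]
      ring
    rw [hr (by simpa [PySem.List.length_pyRange_one] using hkb)]
    simp [PySem.List.pyGetD_natCast, List.getD_eq_getElem?_getD,
      List.getElem?_eq_getElem hkb, List.getElem?_eq_getElem hkt, List.getElem_zip]

-- sorted by the Python tuple order ⇒ first components are nondecreasing
theorem pv_sorted_fst_le (rs : List (Int × Int × Int × Int)) :
    (PySem.List.sorted rs pvKey_largestSquareArea).Pairwise (fun x y => x.1 ≤ y.1) := by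
  refine (PySem.List.sorted_pairwise rs pvKey_largestSquareArea).imp ?_
  intro x y hxy
  rcases (Prod.Lex.le_iff).1 hxy with h | ⟨h, _⟩
  · exact le_of_lt h
  · exact le_of_eq h

-- ===== B-side lemmas: the divide-and-conquer computes the max over all pair scores =====

theorem pv_le_foldl_max (l : List Int) : ∀ (i : Int), i ≤ l.foldl max i := by
  induction l with
  | nil => intro i; exact le_rfl
  | cons x t ih => intro i; exact le_trans (le_max_left i x) (ih (max i x))

theorem pv_foldl_max_init (l : List Int) : ∀ (i j : Int),
    l.foldl max (max i j) = max i (l.foldl max j) := by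
  induction l with
  | nil => intro i j; rfl
  | cons x t ih =>
    intro i j
    simp only [List.foldl_cons]
    rw [max_assoc, ih]

theorem pv_foldl_max_append (a b : List Int) :
    List.foldl max 0 (a ++ b) = max (List.foldl max 0 a) (List.foldl max 0 b) := by
  rw [List.foldl_append]
  have h0 : max (List.foldl max 0 a) 0 = List.foldl max 0 a :=
    max_eq_left (pv_le_foldl_max a 0)
  calc List.foldl max (List.foldl max 0 a) b
      = List.foldl max (max (List.foldl max 0 a) 0) b := by rw [h0]
    _ = max (List.foldl max 0 a) (List.foldl max 0 b) := pv_foldl_max_init b _ 0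

-- splitting the list splits the pair scores into the two halves plus the cross product
theorem pvPairs_split (g : (Int × Int × Int × Int) → (Int × Int × Int × Int) → Int)
    (a b : List (Int × Int × Int × Int)) :
    (pvPairs g (a ++ b)).Perm
      (pvPairs g a ++ pvPairs g b ++ a.flatMap (fun p => b.map (g p))) := by
  rw [← Multiset.coe_eq_coe]
  induction a with
  | nil => simp [pvPairs]
  | cons x a ih =>
    simp only [List.cons_append, pvPairs, List.map_append, List.flatMap_cons,
      ← Multiset.coe_add] at ih ⊢
    rw [ih]
    abel

-- B's cross double loop is a fold of max over the cross-product scores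
theorem pv_cross_loop (left right : List (Int × Int × Int × Int)) :
    ∀ (i : Int),
      left.foldl (fun best p => right.foldl (fun best q => max best (pvSide p q)) best) i
        = List.foldl max i (left.flatMap (fun p => right.map (pvSide p))) := by
  induction left with
  | nil => intro i; rfl
  | cons x t ih =>
    intro i
    simp only [List.foldl_cons, List.flatMap_cons, List.foldl_append]
    rw [← List.foldl_map (f := pvSide x) (g := max), ih]

theorem pvPairs_short (rs : List (Int × Int × Int × Int)) (h : rs.length < 2) :
    pvPairs pvSide rs = [] := by
  cases rs with
  | nil => rfl
  | cons x t =>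
    cases t with
    | nil => rfl
    | cons y u => simp at h

theorem pvSolveF_eq (fuel : Nat) : ∀ (rs : List (Int × Int × Int × Int)),
    rs.length ≤ fuel → pvSolveF fuel rs = List.foldl max 0 (pvPairs pvSide rs) := by
  induction fuel with
  | zero =>
    intro rs hle
    rw [List.length_eq_zero_iff.mp (Nat.le_zero.mp hle)]
    rfl
  | succ fuel ih =>
    intro rs hle
    by_cases h : rs.length < 2
    · rw [pvSolveF, if_pos h, pvPairs_short rs h]
      rfl
    · rw [pvSolveF, if_neg h]
      have ih1 := ih (rs.take (rs.length / 2)) (by simp only [List.length_take]; omega)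
      have ih2 := ih (rs.drop (rs.length / 2)) (by simp only [List.length_drop]; omega)
      simp only [pv_ite_gt_eq_max]
      rw [pv_cross_loop, ih1, ih2]
      set m := rs.length / 2
      set L := List.foldl max 0 (pvPairs pvSide (rs.take m))
      set R := List.foldl max 0 (pvPairs pvSide (rs.drop m))
      have hL : 0 ≤ L := pv_le_foldl_max _ 0
      have hsplit := pvPairs_split pvSide (rs.take m) (rs.drop m)
      rw [List.take_append_drop] at hsplit
      rw [pv_foldl_max_perm hsplit 0, pv_foldl_max_append, pv_foldl_max_append]
      have h1 : max (max L R) 0 = max L R := max_eq_left (le_trans hL (le_max_left L R))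
      calc List.foldl max (max L R)
            ((rs.take m).flatMap (fun p => (rs.drop m).map (pvSide p)))
          = List.foldl max (max (max L R) 0)
            ((rs.take m).flatMap (fun p => (rs.drop m).map (pvSide p))) := by rw [h1]
        _ = max (max L R) (List.foldl max 0
            ((rs.take m).flatMap (fun p => (rs.drop m).map (pvSide p)))) :=
              pv_foldl_max_init _ _ 0

theorem pvSolve_eq (rs : List (Int × Int × Int × Int)) :
    pvSolve rs = List.foldl max 0 (pvPairs pvSide rs) :=
  pvSolveF_eq rs.length rs le_rfl

-- ===== VERDICT (by name: the statement is the Claim_ definition above) =====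
theorem largestSquareArea_spec : Claim_equal_largestSquareArea := by
  intro bl tr _ hpre
  obtain ⟨hlen, _, _⟩ := hpre
  show largestSquareArea bl tr = largestSquareArea_alt bl tr
  unfold largestSquareArea largestSquareArea_alt
  simp only [pv_ite_gt_eq_max]
  rw [pv_rects_eq bl tr hlen]
  set rects := (bl.zip tr).map (fun bt =>
      (PySem.List.pyGetD bt.1 0 0, PySem.List.pyGetD bt.1 1 0,
       PySem.List.pyGetD bt.2 0 0, PySem.List.pyGetD bt.2 1 0)) with hrects
  set srt := PySem.List.sorted rects pvKey_largestSquareArea with hsrt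
  have hGAdef : ∀ u t : Int × Int × Int × Int,
      min (min u.2.2.1 t.2.2.1 - t.1) (min u.2.2.2 t.2.2.2 - max u.2.1 t.2.1) = pvGA u t :=
    fun _ _ => rfl
  simp only [hGAdef]
  have hperm : srt.Perm rects := PySem.List.sorted_perm rects pvKey_largestSquareArea false
  have hlen2 : rects.length = bl.length := by
    rw [hrects, List.length_map, List.length_zip]
    omega
  have hlen3 : srt.length = bl.length := by rw [hperm.length_eq, hlen2]
  have hA : (PySem.List.pyRange 1 (bl.length : Int)).foldl (fun ms r =>
        (PySem.List.pyRange 0 r).foldl (fun ms l =>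
          max ms (pvGA (PySem.List.pyGetD srt l (0, 0, 0, 0))
                        (PySem.List.pyGetD srt r (0, 0, 0, 0)))) ms) 0
      = List.foldl max 0 (pvPairs pvGA srt) := by
    have h := pv_outer_loop srt bl.length (by omega)
    rwa [List.take_of_length_le (by omega)] at h
  have hGA : pvPairs pvGA srt = pvPairs pvSide srt := by
    refine pvPairs_congr (rel := fun x y => x.1 ≤ y.1) ?_ (pv_sorted_fst_le rects)
    intro x y hxy
    unfold pvGA pvSide
    rw [max_eq_right hxy]
  have hsym : ∀ x y : Int × Int × Int × Int, pvSide x y = pvSide y x := by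
    intro x y
    unfold pvSide
    rw [min_comm x.2.2.1, max_comm x.1, min_comm x.2.2.2, max_comm x.2.1]
  rw [pvSolve_eq, hA, hGA, pv_foldl_max_perm (pvPairs_perm hsym hperm) 0]
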